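-- pv_equiv track=rewrite | github.com/miliar/Code_Jam_Webscraper | solutions_python/Problem_201/166.py | step
-- ===== SOURCE A (Python) =====
-- def step(a):
--     bestl = -1
--     bestr = -1
--     bestpos = 0
--     for i in range(1, len(a) - 1):
--         if a[i]:
--             continue
--         l = 0
--         for j in range(i - 1, 0, -1):
--             if a[j]:
--                 break
--             else:
--                 l += 1
--         r = 0
--         for j in range(i + 1, len(a)):
--             if a[j]:
--                 break
--             else:
--                 r += 1
--         if min(bestl, bestr) < min(r, l) or min(bestl, bestr) == min(r, l) and max(bestl, bestr) < max(r, l):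
--             bestl = l
--             bestr = r
--             bestpos = i
--     a[bestpos] = True
--     return bestl, bestr
-- ===== SOURCE B (Python) =====
-- def step(a):
--     n = len(a)
--     # left[j]: length of the run of empty slots ending at j, never counting index 0
--     left = [0] * n
--     for j in range(1, n):
--         left[j] = 0 if a[j] else left[j - 1] + 1
--     # right[j]: length of the run of empty slots starting at j
--     right = [0] * (n + 1)
--     for j in range(n - 1, -1, -1):
--         right[j] = 0 if a[j] else right[j + 1] + 1
--     bestl = -1
--     bestr = -1
--     bestpos = 0
--     for i in range(1, n - 1):
--         if a[i]:
--             continue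
--         l = left[i - 1]
--         r = right[i + 1]
--         if (min(l, r), max(l, r)) > (min(bestl, bestr), max(bestl, bestr)):
--             bestl, bestr, bestpos = l, r, i
--     a[bestpos] = True
--     return bestl, bestr
-- ===== Notes on version B (the rewrite author's own statement) =====
-- stated objective: alternative
-- what changed: Replaced the per-slot inner scans for the surrounding empty runs by two linear precomputed run-length arrays (left runs ending at j, right runs starting at j) and a single scan with the same (min,max) tie-break.
import Mathlib
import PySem

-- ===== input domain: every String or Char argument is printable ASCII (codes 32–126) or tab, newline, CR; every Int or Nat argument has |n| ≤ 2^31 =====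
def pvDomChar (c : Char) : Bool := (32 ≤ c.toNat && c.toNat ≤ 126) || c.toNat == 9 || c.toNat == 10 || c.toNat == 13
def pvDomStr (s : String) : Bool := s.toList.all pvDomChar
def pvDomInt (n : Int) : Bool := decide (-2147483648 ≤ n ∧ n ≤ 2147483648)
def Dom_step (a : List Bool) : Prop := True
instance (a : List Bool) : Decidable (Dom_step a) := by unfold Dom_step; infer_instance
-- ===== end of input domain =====

-- B replaces A's quadratic per-slot inner scans by two linear run-length arrays and one scan (objective: alternative; a timing run measured no significant speed-up on its inputs).
-- Both A and B mutate a[bestpos] = True identically; the equivalence proved here is about the return value.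

-- ===== PORT A =====
-- inner loop 'for j in range(i-1, 0, -1): if a[j]: break else l += 1' as structural recursion on the index
-- (indices visited are always in range, so getD's default is never read)
def lcountA (a : List Bool) : Nat → Int
  | 0 => 0
  | j + 1 => if a.getD (j + 1) false then 0 else lcountA a j + 1

-- inner loop 'for j in range(i+1, len(a)): if a[j]: break else r += 1'
def rcountA (a : List Bool) (j : Nat) : Int :=
  if _h : j < a.length then (if a.getD j false then 0 else rcountA a (j + 1) + 1) else 0
termination_by a.length - j

def step (a : List Bool) : Int × Int :=
  let res := (PySem.List.pyRange 1 ((a.length : Int) - 1) 1).foldl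
    (fun (st : Int × Int × Int) i =>
      let (bestl, bestr, bestpos) := st
      if PySem.List.pyGetD a i false then (bestl, bestr, bestpos)
      else
        let l := lcountA a (i.toNat - 1)
        let r := rcountA a (i.toNat + 1)
        if min bestl bestr < min r l ∨ (min bestl bestr = min r l ∧ max bestl bestr < max r l)
        then (l, r, i) else (bestl, bestr, bestpos))
    (-1, -1, 0)
  (res.1, res.2.1)

-- ===== PORT B =====
-- left run-length array: value at each position, threaded through 'prev' (Python's left[] loop)
def leftGo (prev : Int) : List Bool → List Int
  | [] => []
  | b :: rest => (if b then 0 else prev + 1) :: leftGo (if b then 0 else prev + 1) rest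

def leftRuns : List Bool → List Int
  | [] => []
  | _ :: rest => 0 :: leftGo 0 rest

-- right run-length array, built back-to-front (Python's right[] loop); right[n] = 0 is the getD default
def rightRuns : List Bool → List Int
  | [] => []
  | b :: rest => (if b then 0 else (rightRuns rest).headD 0 + 1) :: rightRuns rest

-- Python tuple '>' (lexicographic)
def pairGt (p q : Int × Int) : Bool := decide (q.1 < p.1 ∨ (q.1 = p.1 ∧ q.2 < p.2))

def step_alt (a : List Bool) : Int × Int :=
  let left := leftRuns a
  let right := rightRuns a
  let res := (PySem.List.pyRange 1 ((a.length : Int) - 1) 1).foldl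
    (fun (st : Int × Int × Int) i =>
      let (bestl, bestr, bestpos) := st
      if PySem.List.pyGetD a i false then (bestl, bestr, bestpos)
      else
        let l := left.getD (i.toNat - 1) 0
        let r := right.getD (i.toNat + 1) 0
        if pairGt (min l r, max l r) (min bestl bestr, max bestl bestr)
        then (l, r, i) else (bestl, bestr, bestpos))
    (-1, -1, 0)
  (res.1, res.2.1)

-- ===== PRECONDITION & SPEC =====
-- Pre_ excludes only the empty list, on which A (and B) raise IndexError at 'a[bestpos] = True'.
def Pre_step (a : List Bool) : Prop := a ≠ []
instance (a : List Bool) : Decidable (Pre_step a) := by unfold Pre_step; infer_instance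
def pvWitness_step : List Bool := [false, false, true]
def Spec_step (a : List Bool) (out : Int × Int) : Prop := out = step_alt a
instance (a : List Bool) (out : Int × Int) : Decidable (Spec_step a out) := by unfold Spec_step; infer_instance

-- ===== CLAIM (what is proved, stated in full; the proofs are below) =====
def Claim_equal_step : Prop := ∀ (a : List Bool), Dom_step a → Pre_step a → Spec_step a (step a)

-- ===== LEMMAS AND PROOFS =====
theorem rcountA_cons (b : Bool) (rest : List Bool) (j : Nat) :
    rcountA (b :: rest) (j + 1) = rcountA rest j := by
  have key : ∀ k j, rest.length - j ≤ k → rcountA (b :: rest) (j + 1) = rcountA rest j := by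
    intro k
    induction k with
    | zero =>
      intro j hj
      rw [rcountA, dif_neg (by simp; omega)]
      conv_rhs => rw [rcountA]
      rw [dif_neg (by omega)]
    | succ k ih =>
      intro j hj
      by_cases h : j < rest.length
      · conv_lhs => rw [rcountA]
        rw [dif_pos (by simp; omega)]
        conv_rhs => rw [rcountA]
        rw [dif_pos h]
        simp only [List.getD_cons_succ]
        rw [ih (j + 1) (by omega)]
      · rw [rcountA, dif_neg (by simp; omega)]
        conv_rhs => rw [rcountA]
        rw [dif_neg h]
  exact key (rest.length - j) j le_rfl

theorem rcount_eq (a : List Bool) (j : Nat) :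
    rcountA a j = (rightRuns a).getD j 0 := by
  induction a generalizing j with
  | nil => rw [rcountA]; simp [rightRuns]
  | cons b rest ih =>
    cases j with
    | zero =>
      rw [rcountA]
      rw [dif_pos (by simp)]
      rw [rcountA_cons, ih, rightRuns]
      simp only [List.getD_cons_zero]
      cases hr : rightRuns rest <;> simp [List.getD]
    | succ j =>
      rw [rcountA_cons, ih, rightRuns]
      simp

theorem leftGo_getD_succ (rest : List Bool) (prev : Int) (j : Nat) (h : j + 1 < rest.length) :
    (leftGo prev rest).getD (j + 1) 0 =
      if rest.getD (j + 1) false then 0 else (leftGo prev rest).getD j 0 + 1 := by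
  induction rest generalizing prev j with
  | nil => simp at h
  | cons b r ih =>
    cases j with
    | zero =>
      cases r with
      | nil => simp at h
      | cons c r' => simp [leftGo]
    | succ k =>
      have hk : k + 1 < r.length := by simp at h; omega
      simp only [leftGo, List.getD_cons_succ, List.getD_cons_succ]
      exact ih _ k hk

theorem leftRuns_succ (a : List Bool) (j : Nat) (h : j + 1 < a.length) :
    (leftRuns a).getD (j + 1) 0 =
      if a.getD (j + 1) false then 0 else (leftRuns a).getD j 0 + 1 := by
  cases a with
  | nil => simp at h
  | cons b rest =>
    cases j with
    | zero =>
      cases rest with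
      | nil => simp at h
      | cons c r' => simp [leftRuns, leftGo]
    | succ k =>
      have hk : k + 1 < rest.length := by simp at h; omega
      simp only [leftRuns, List.getD_cons_succ]
      exact leftGo_getD_succ rest 0 k hk

theorem lcount_eq (a : List Bool) (j : Nat) (h : j < a.length) :
    lcountA a j = (leftRuns a).getD j 0 := by
  induction j with
  | zero =>
    cases a with
    | nil => simp at h
    | cons b rest => simp [lcountA, leftRuns]
  | succ k ih =>
    rw [lcountA, leftRuns_succ a k h, ih (by omega)]

theorem step_eq_alt (a : List Bool) : step a = step_alt a := by
  unfold step step_alt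
  have hfold :
      (PySem.List.pyRange 1 ((a.length : Int) - 1) 1).foldl
        (fun (st : Int × Int × Int) i =>
          let (bestl, bestr, bestpos) := st
          if PySem.List.pyGetD a i false then (bestl, bestr, bestpos)
          else
            let l := lcountA a (i.toNat - 1)
            let r := rcountA a (i.toNat + 1)
            if min bestl bestr < min r l ∨ (min bestl bestr = min r l ∧ max bestl bestr < max r l)
            then (l, r, i) else (bestl, bestr, bestpos))
        (-1, -1, 0)
      =
      (PySem.List.pyRange 1 ((a.length : Int) - 1) 1).foldl
        (fun (st : Int × Int × Int) i =>
          let (bestl, bestr, bestpos) := st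
          if PySem.List.pyGetD a i false then (bestl, bestr, bestpos)
          else
            let l := (leftRuns a).getD (i.toNat - 1) 0
            let r := (rightRuns a).getD (i.toNat + 1) 0
            if pairGt (min l r, max l r) (min bestl bestr, max bestl bestr)
            then (l, r, i) else (bestl, bestr, bestpos))
        (-1, -1, 0) := by
    apply PySem.List.foldl_congr_mem
    intro st i hi
    obtain ⟨h1, h2⟩ := (PySem.List.mem_pyRange_one).mp hi
    obtain ⟨bl, br, bp⟩ := st
    simp only
    by_cases hg : PySem.List.pyGetD a i false
    · simp [hg]
    · simp only [hg, if_false, Bool.false_eq_true]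
      have hl : lcountA a (i.toNat - 1) = (leftRuns a).getD (i.toNat - 1) 0 :=
        lcount_eq a (i.toNat - 1) (by omega)
      have hr : rcountA a (i.toNat + 1) = (rightRuns a).getD (i.toNat + 1) 0 :=
        rcount_eq a (i.toNat + 1)
      rw [hl, hr]
      set l := (leftRuns a).getD (i.toNat - 1) 0
      set r := (rightRuns a).getD (i.toNat + 1) 0
      have hcond : (min bl br < min r l ∨ (min bl br = min r l ∧ max bl br < max r l)) ↔
          pairGt (min l r, max l r) (min bl br, max bl br) = true := by
        simp only [pairGt, decide_eq_true_eq]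
        omega
      by_cases hc : min bl br < min r l ∨ (min bl br = min r l ∧ max bl br < max r l)
      · rw [if_pos hc, if_pos (hcond.mp hc)]
      · rw [if_neg hc, if_neg (fun hb => hc (hcond.mpr hb))]
  simp only
  rw [hfold]

-- ===== VERDICT (by name: the statement is the Claim_ definition above) =====
theorem step_spec : Claim_equal_step := by
  intro a _ _
  unfold Spec_step
  exact step_eq_alt a
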